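-- pv_equiv track=rewrite | github.com/simgeekiz/ApplabAPI | group2api/utils/moment.py | filter_first
-- ===== SOURCE A (Python) =====
-- def filter_first(answers, exercise_ids):
--     exercises_processed = []
--     return_answers = []
--     for i in range(len(answers)):
--         if exercise_ids[i] not in exercises_processed:
--             exercises_processed.append(exercise_ids[i])
--         else:
--             return_answers.append(answers[i])
--     return return_answers
-- ===== SOURCE B (Python) =====
-- def filter_first(answers, exercise_ids):
--     # Two-pass: first map each exercise id to its first index, then keep
--     # answers at non-first indices. Explicit indexing preserves IndexError
--     # on a too-short exercise_ids, exactly like the original.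
--     first_index = {}
--     for i in range(len(answers)):
--         eid = exercise_ids[i]
--         if eid not in first_index:
--             first_index[eid] = i
--     out = []
--     for i in range(len(answers)):
--         if first_index[exercise_ids[i]] != i:
--             out.append(answers[i])
--     return out
-- ===== Notes on version B (the rewrite author's own statement) =====
-- stated objective: faster
-- what changed: Replaces the single pass with an in-loop linear membership scan of a growing list by two passes: a dict mapping each exercise id to its first index, then a filter keeping answers whose index is not that first index.
import Mathlib
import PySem

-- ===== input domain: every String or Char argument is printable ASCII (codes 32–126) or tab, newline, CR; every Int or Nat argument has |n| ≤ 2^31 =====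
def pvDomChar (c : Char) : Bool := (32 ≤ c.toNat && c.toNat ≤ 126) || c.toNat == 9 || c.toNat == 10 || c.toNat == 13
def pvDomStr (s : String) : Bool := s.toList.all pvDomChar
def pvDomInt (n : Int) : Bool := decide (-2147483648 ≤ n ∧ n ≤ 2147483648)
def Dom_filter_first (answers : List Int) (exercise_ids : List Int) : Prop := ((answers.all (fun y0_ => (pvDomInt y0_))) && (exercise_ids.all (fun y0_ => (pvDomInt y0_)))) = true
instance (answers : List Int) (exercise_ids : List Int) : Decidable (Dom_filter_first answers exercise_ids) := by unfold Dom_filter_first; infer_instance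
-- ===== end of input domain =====

-- B replaces A's quadratic membership scan of a growing list by two linear passes
-- through a first-occurrence-index dict; equivalence is proved on all inputs where A returns.

-- ===== PORT A =====
-- literal transliteration: state = (exercises_processed, return_answers); indexing
-- exercise_ids[i]/answers[i] via pyGetD (in range under Pre_filter_first).
def filter_first (answers : List Int) (exercise_ids : List Int) : List Int :=
  ((PySem.List.pyRange 0 (answers.length : Int) 1).foldl
    (fun (st : List Int × List Int) i =>
      if PySem.List.pyGetD exercise_ids i 0 ∉ st.1 then
        (st.1 ++ [PySem.List.pyGetD exercise_ids i 0], st.2)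
      else
        (st.1, st.2 ++ [PySem.List.pyGetD answers i 0]))
    ([], [])).2

-- ===== PORT B =====
-- transliteration of Source B; the second-pass dict subscript is getD (the key is
-- always present: the first pass inserted it at the same index).
def filter_first_alt (answers : List Int) (exercise_ids : List Int) : List Int :=
  let first_index : PySem.Dict Int Int :=
    (PySem.List.pyRange 0 (answers.length : Int) 1).foldl
      (fun d i =>
        if ¬ d.contains (PySem.List.pyGetD exercise_ids i 0) then
          d.insert (PySem.List.pyGetD exercise_ids i 0) i
        else d)
      PySem.Dict.empty
  (PySem.List.pyRange 0 (answers.length : Int) 1).foldl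
    (fun acc i =>
      if first_index.getD (PySem.List.pyGetD exercise_ids i 0) 0 ≠ i then
        acc ++ [PySem.List.pyGetD answers i 0]
      else acc) []

-- ===== PRECONDITION & SPEC =====
-- A raises IndexError when exercise_ids is shorter than answers; exactly those inputs are excluded.
def Pre_filter_first (answers : List Int) (exercise_ids : List Int) : Prop :=
  answers.length ≤ exercise_ids.length
instance (answers : List Int) (exercise_ids : List Int) : Decidable (Pre_filter_first answers exercise_ids) := by unfold Pre_filter_first; infer_instance
def pvWitness_filter_first : List Int × List Int := ([10, 20, 30, 40], [1, 2, 1, 2])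

def Spec_filter_first (answers : List Int) (exercise_ids : List Int) (out : List Int) : Prop := out = filter_first_alt answers exercise_ids
instance (answers : List Int) (exercise_ids : List Int) (out : List Int) : Decidable (Spec_filter_first answers exercise_ids out) := by unfold Spec_filter_first; infer_instance

-- ===== CLAIM (what is proved, stated in full; the proofs are below) =====
def Claim_equal_filter_first : Prop := ∀ (answers : List Int) (exercise_ids : List Int), Dom_filter_first answers exercise_ids → Pre_filter_first answers exercise_ids → Spec_filter_first answers exercise_ids (filter_first answers exercise_ids)

-- ===== LEMMAS AND PROOFS =====

-- Nat-indexed models of the three loops (e j = exercise_ids[j], a j = answers[j]).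
def pvStA (e a : Nat → Int) : Nat → List Int × List Int
  | 0 => ([], [])
  | m+1 =>
    if e m ∉ (pvStA e a m).1 then ((pvStA e a m).1 ++ [e m], (pvStA e a m).2)
    else ((pvStA e a m).1, (pvStA e a m).2 ++ [a m])

def pvDB (e : Nat → Int) : Nat → PySem.Dict Int Int
  | 0 => PySem.Dict.empty
  | m+1 =>
    if ¬ (pvDB e m).contains (e m) then (pvDB e m).insert (e m) (m : Int)
    else pvDB e m

def pvRB (e a : Nat → Int) (d : PySem.Dict Int Int) : Nat → List Int
  | 0 => []
  | m+1 =>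
    if d.getD (e m) 0 ≠ (m : Int) then pvRB e a d m ++ [a m] else pvRB e a d m

lemma pvRange_succ (n : Nat) :
    PySem.List.pyRange 0 ((n+1 : Nat) : Int) 1
      = PySem.List.pyRange 0 (n : Int) 1 ++ [(n : Int)] := by
  have h := PySem.List.pyRange_one_succ_right (a := 0) (b := (n : Int)) (by positivity)
  push_cast
  exact h

-- generic: a foldl over range(n) equals the Nat-recursive model of the loop
lemma pvFold_model {σ : Type} (f : σ → Int → σ) (g : Nat → σ) (init : σ)
    (h0 : g 0 = init) (hs : ∀ m, g (m+1) = f (g m) (m : Int)) :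
    ∀ n : Nat, (PySem.List.pyRange 0 (n : Int) 1).foldl f init = g n := by
  intro n
  induction n with
  | zero =>
    rw [show ((0:Nat) : Int) = 0 from rfl, PySem.List.pyRange_one_eq_nil le_rfl]
    simp [h0]
  | succ m ih => rw [pvRange_succ, List.foldl_append, ih, List.foldl, List.foldl, hs]

lemma pvFoldA (answers exercise_ids : List Int) (n : Nat) :
    (PySem.List.pyRange 0 (n : Int) 1).foldl
      (fun (st : List Int × List Int) i =>
        if PySem.List.pyGetD exercise_ids i 0 ∉ st.1 then
          (st.1 ++ [PySem.List.pyGetD exercise_ids i 0], st.2)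
        else
          (st.1, st.2 ++ [PySem.List.pyGetD answers i 0]))
      ([], [])
    = pvStA (fun j => PySem.List.pyGetD exercise_ids (j : Int) 0)
            (fun j => PySem.List.pyGetD answers (j : Int) 0) n :=
  pvFold_model _
    (pvStA (fun j => PySem.List.pyGetD exercise_ids (j : Int) 0)
           (fun j => PySem.List.pyGetD answers (j : Int) 0)) _
    rfl (fun m => rfl) n

lemma pvFoldD (exercise_ids : List Int) (n : Nat) :
    (PySem.List.pyRange 0 (n : Int) 1).foldl
      (fun (d : PySem.Dict Int Int) i =>
        if ¬ d.contains (PySem.List.pyGetD exercise_ids i 0) then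
          d.insert (PySem.List.pyGetD exercise_ids i 0) i
        else d)
      PySem.Dict.empty
    = pvDB (fun j => PySem.List.pyGetD exercise_ids (j : Int) 0) n :=
  pvFold_model _ (pvDB (fun j => PySem.List.pyGetD exercise_ids (j : Int) 0)) _
    rfl (fun m => rfl) n

lemma pvFoldR (answers exercise_ids : List Int) (d : PySem.Dict Int Int) (n : Nat) :
    (PySem.List.pyRange 0 (n : Int) 1).foldl
      (fun acc i =>
        if d.getD (PySem.List.pyGetD exercise_ids i 0) 0 ≠ i then
          acc ++ [PySem.List.pyGetD answers i 0]
        else acc) []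
    = pvRB (fun j => PySem.List.pyGetD exercise_ids (j : Int) 0)
           (fun j => PySem.List.pyGetD answers (j : Int) 0) d n :=
  pvFold_model _
    (pvRB (fun j => PySem.List.pyGetD exercise_ids (j : Int) 0)
          (fun j => PySem.List.pyGetD answers (j : Int) 0) d) _
    rfl (fun m => rfl) n

-- A-side invariant: the processed list holds exactly the ids seen so far
lemma pvMemA (e a : Nat → Int) (m : Nat) (x : Int) :
    x ∈ (pvStA e a m).1 ↔ ∃ j < m, e j = x := by
  induction m with
  | zero => simp [pvStA]
  | succ m ih =>
    rw [pvStA]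
    split_ifs with h
    · -- e m already processed: list unchanged
      dsimp only
      rw [ih]
      constructor
      · rintro ⟨j, hj, hje⟩; exact ⟨j, by omega, hje⟩
      · rintro ⟨j, hj, hje⟩
        rcases Nat.lt_succ_iff_lt_or_eq.mp hj with hj2 | hj2
        · exact ⟨j, hj2, hje⟩
        · subst hj2; rw [hje, ih] at h; exact h
    · dsimp only
      rw [List.mem_append, List.mem_singleton, ih]
      constructor
      · rintro (⟨j, hj, hje⟩ | rfl)
        · exact ⟨j, by omega, hje⟩
        · exact ⟨m, by omega, rfl⟩
      · rintro ⟨j, hj, hje⟩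
        rcases Nat.lt_succ_iff_lt_or_eq.mp hj with hj2 | hj2
        · exact Or.inl ⟨j, hj2, hje⟩
        · subst hj2; exact Or.inr hje.symm

-- B-side: the dict contains exactly the ids seen so far
lemma pvContainsD (e : Nat → Int) (m : Nat) (x : Int) :
    (pvDB e m).contains x = true ↔ ∃ j < m, e j = x := by
  induction m with
  | zero => simp [pvDB]
  | succ m ih =>
    rw [pvDB]
    split_ifs with h
    · -- e m already present: dict unchanged
      rw [ih]
      constructor
      · rintro ⟨j, hj, hje⟩; exact ⟨j, by omega, hje⟩
      · rintro ⟨j, hj, hje⟩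
        rcases Nat.lt_succ_iff_lt_or_eq.mp hj with hj2 | hj2
        · exact ⟨j, hj2, hje⟩
        · subst hj2; rw [hje, ih] at h; exact h
    · rw [PySem.Dict.contains_insert, Bool.or_eq_true, beq_iff_eq, ih]
      constructor
      · rintro (rfl | ⟨j, hj, hje⟩)
        · exact ⟨m, by omega, rfl⟩
        · exact ⟨j, by omega, hje⟩
      · rintro ⟨j, hj, hje⟩
        rcases Nat.lt_succ_iff_lt_or_eq.mp hj with hj2 | hj2
        · exact Or.inr ⟨j, hj2, hje⟩
        · subst hj2; exact Or.inl hje.symm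

-- main dict invariant: the stored value is the first occurrence index
lemma pvInvD (e : Nat → Int) (m : Nat) (x v : Int) :
    (pvDB e m).get? x = some v ↔
      ∃ j < m, v = (j : Int) ∧ e j = x ∧ ∀ k < j, e k ≠ x := by
  induction m with
  | zero => simp [pvDB, PySem.Dict.get?_empty]
  | succ m ih =>
    rw [pvDB]
    split_ifs with h
    · -- e m already present: dict unchanged, and j = m cannot be a first occurrence
      have hseen : ∃ j < m, e j = e m := (pvContainsD e m (e m)).mp h
      rw [ih]
      constructor
      · rintro ⟨j, hj, hv, hje, hmin⟩; exact ⟨j, by omega, hv, hje, hmin⟩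
      · rintro ⟨j, hj, hv, hje, hmin⟩
        rcases Nat.lt_succ_iff_lt_or_eq.mp hj with hj2 | hj2
        · exact ⟨j, hj2, hv, hje, hmin⟩
        · subst hj2
          obtain ⟨k, hk, hke⟩ := hseen
          exact absurd (hje ▸ hke) (hmin k hk)
    · have hnot : ∀ j < m, e j ≠ e m :=
        fun j hj hje => h ((pvContainsD e m (e m)).mpr ⟨j, hj, hje⟩)
      rw [PySem.Dict.get?_insert]
      split_ifs with hx
      · subst hx
        simp only [Option.some_inj]
        constructor
        · rintro rfl
          exact ⟨m, by omega, rfl, rfl, fun k hk => hnot k hk⟩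
        · rintro ⟨j, hj, rfl, hje, hmin⟩
          rcases Nat.lt_succ_iff_lt_or_eq.mp hj with hj2 | hj2
          · exact absurd hje (hnot j hj2)
          · subst hj2; rfl
      · rw [ih]
        constructor
        · rintro ⟨j, hj, hv, hje, hmin⟩; exact ⟨j, by omega, hv, hje, hmin⟩
        · rintro ⟨j, hj, hv, hje, hmin⟩
          rcases Nat.lt_succ_iff_lt_or_eq.mp hj with hj2 | hj2
          · exact ⟨j, hj2, hv, hje, hmin⟩
          · subst hj2; exact absurd hje (fun hh => hx hh.symm)

-- B\'s first-occurrence test ↔ "this id was seen at an earlier index"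
lemma pvGetD_dB (e : Nat → Int) (n i : Nat) (hi : i < n) :
    ((pvDB e n).getD (e i) 0 ≠ (i : Int)) ↔ ∃ k < i, e k = e i := by
  have hex : ∃ j, e j = e i := ⟨i, rfl⟩
  have hfind : e (Nat.find hex) = e i := Nat.find_spec hex
  have hj0le : Nat.find hex ≤ i := Nat.find_le rfl
  have hmin : ∀ k < Nat.find hex, e k ≠ e i := fun k hk => Nat.find_min hex hk
  have hget : (pvDB e n).get? (e i) = some ((Nat.find hex : Nat) : Int) :=
    (pvInvD e n (e i) _).mpr ⟨Nat.find hex, by omega, rfl, hfind, hmin⟩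
  rw [PySem.Dict.getD_eq_get?_getD, hget, Option.getD_some]
  constructor
  · intro hne
    have hne2 : Nat.find hex ≠ i := fun hh => hne (by exact_mod_cast congrArg Nat.cast hh)
    exact ⟨Nat.find hex, by omega, hfind⟩
  · rintro ⟨k, hk, hke⟩ heq
    have heq2 : Nat.find hex = i := by exact_mod_cast heq
    exact (hmin k (by omega)) hke

-- the two result lists agree step by step
lemma pvRetEq (e a : Nat → Int) (n : Nat) :
    ∀ m, m ≤ n → (pvStA e a m).2 = pvRB e a (pvDB e n) m := by
  intro m
  induction m with
  | zero => intro _; simp [pvStA, pvRB]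
  | succ m ih =>
    intro hmn
    have hcondA := pvMemA e a m (e m)
    have hcondB := pvGetD_dB e n m (by omega)
    rw [pvStA, pvRB]
    split_ifs with h1 h2 h2
    · -- A appends (seen before), B appends
      dsimp only; rw [ih (by omega)]
    · -- A appends but B does not: impossible
      exact absurd (hcondB.mpr (hcondA.mp h1)) h2
    · -- A does not append but B does: impossible
      exact absurd (hcondA.mpr (hcondB.mp h2)) h1
    · dsimp only; exact ih (by omega)

-- ===== VERDICT (by name: the statement is the Claim_ definition above) =====
theorem filter_first_spec : Claim_equal_filter_first := by
  intro answers exercise_ids _ _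
  unfold Spec_filter_first filter_first filter_first_alt
  rw [pvFoldA, pvFoldD, pvFoldR]
  exact pvRetEq _ _ answers.length answers.length le_rfl
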